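-- pv_equiv track=rewrite | github.com/DerejSoftt/derej-turnos | turnos/system_turnos/views.py | incrementar_letras
-- ===== SOURCE A (Python) =====
-- def incrementar_letras(letras):
--     """Incrementa letras en secuencia (AA->AB, AZ->BA, ZZ->AAA)"""
--     letras = list(letras.upper())
--     carry = True
--     i = len(letras) - 1
--
--     while carry and i >= 0:
--         if letras[i] == 'Z':
--             letras[i] = 'A'
--             i -= 1
--         else:
--             letras[i] = chr(ord(letras[i]) + 1)
--             carry = False
--
--     if carry:
--         letras.insert(0, 'A')
--
--     return ''.join(letras)
-- ===== SOURCE B (Python) =====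
-- def incrementar_letras(letras):
--     s = letras.upper()
--     core = s.rstrip('Z')
--     fill = 'A' * (len(s) - len(core))
--     if not core:
--         return fill + 'A'
--     return core[:-1] + chr(ord(core[-1]) + 1) + fill
-- ===== Notes on version B (the rewrite author's own statement) =====
-- stated objective: idiomatic
-- what changed: Replaces A's right-to-left mutate-and-carry while loop over a char list with a loop-free staged computation: strip the trailing 'Z' run with str.rstrip, then assemble the answer by a single slice/concatenation (all-Z and empty inputs fall out of the empty-core case).
import Mathlib
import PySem

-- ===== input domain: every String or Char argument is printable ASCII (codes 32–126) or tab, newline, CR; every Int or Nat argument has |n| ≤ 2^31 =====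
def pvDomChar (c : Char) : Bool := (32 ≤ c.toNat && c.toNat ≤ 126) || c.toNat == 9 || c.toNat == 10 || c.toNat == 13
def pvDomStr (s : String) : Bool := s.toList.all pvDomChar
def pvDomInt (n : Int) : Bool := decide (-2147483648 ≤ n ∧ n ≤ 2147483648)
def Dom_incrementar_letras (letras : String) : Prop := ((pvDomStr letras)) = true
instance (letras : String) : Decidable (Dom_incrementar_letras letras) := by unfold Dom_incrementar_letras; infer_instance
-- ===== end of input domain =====

-- B drops A's right-to-left mutate-and-carry loop for a loop-free staged computation
-- (rstrip the trailing 'Z' run, then one slice/concatenation); same return value everywhere.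

-- ===== PORT A =====
-- A's while loop walks the char list from the right while carry holds: each 'Z' becomes
-- 'A', the first non-'Z' is incremented and the loop stops. We run it as structural
-- recursion over the reversed character list, returning (modified reversed list, carry).
def pvStepA : List Char → List Char × Bool
  | [] => ([], true)
  | c :: t =>
      if c = 'Z' then
        let p := pvStepA t
        ('A' :: p.1, p.2)
      else
        (Char.ofNat (c.toNat + 1) :: t, false)

def incrementar_letras (letras : String) : String :=
  let r := (PySem.Str.upper letras).toList.reverse
  let p := pvStepA r
  let out := if p.2 then 'A' :: p.1.reverse else p.1.reverse
  String.ofList out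

-- ===== PORT B =====
-- s.rstrip('Z') has no PySem primitive; ported by hand, exact: drop the maximal run of
-- 'Z' from the right = reverse → dropWhile (= 'Z') → reverse.
def incrementar_letras_alt (letras : String) : String :=
  let l := (PySem.Str.upper letras).toList
  let core := (l.reverse.dropWhile (fun c => c = 'Z')).reverse
  let fill := List.replicate (l.length - core.length) 'A'
  if core = [] then String.ofList (fill ++ ['A'])
  else String.ofList (core.dropLast ++ Char.ofNat ((core.getLast?.getD 'A').toNat + 1) :: fill)

-- ===== PRECONDITION & SPEC =====
def Spec_incrementar_letras (letras : String) (out : String) : Prop := out = incrementar_letras_alt letras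
instance (letras : String) (out : String) : Decidable (Spec_incrementar_letras letras out) := by unfold Spec_incrementar_letras; infer_instance

-- ===== CLAIM (what is proved, stated in full; the proofs are below) =====
def Claim_equal_incrementar_letras : Prop := ∀ (letras : String), Dom_incrementar_letras letras → Spec_incrementar_letras letras (incrementar_letras letras)

-- ===== LEMMAS AND PROOFS =====

-- Characterisation of A's carry loop by the takeWhile/dropWhile split at the 'Z' run.
theorem pvStepA_eq (r : List Char) :
    pvStepA r = match r.dropWhile (fun c => c = 'Z') with
      | [] => (List.replicate r.length 'A', true)
      | c :: t => (List.replicate (r.takeWhile (fun c => c = 'Z')).length 'A' ++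
                     Char.ofNat (c.toNat + 1) :: t, false) := by
  induction r with
  | nil => simp [pvStepA]
  | cons c t ih =>
      by_cases hc : c = 'Z'
      · subst hc
        simp only [pvStepA, if_pos rfl, List.dropWhile_cons, List.takeWhile_cons, decide_true,
          if_true, ih]
        cases h : t.dropWhile (fun c => c = 'Z') with
        | nil => simp [h, List.replicate_succ]
        | cons d u => simp [h, List.replicate_succ]
      · simp [pvStepA, hc, List.dropWhile_cons, List.takeWhile_cons]

-- ===== VERDICT (by name: the statement is the Claim_ definition above) =====
theorem incrementar_letras_spec : Claim_equal_incrementar_letras := by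
  intro letras _
  unfold Spec_incrementar_letras
  simp only [incrementar_letras, incrementar_letras_alt]
  generalize (PySem.Str.upper letras).toList = l
  rw [pvStepA_eq]
  cases h : l.reverse.dropWhile (fun c => c = 'Z') with
  | nil =>
      have h2 : 'A' :: List.replicate l.length 'A' = List.replicate l.length 'A' ++ ['A'] := by
        rw [← List.replicate_succ, List.replicate_succ']
      simp [h, h2]
  | cons c t =>
      have hsplit : l.reverse.takeWhile (fun c => c = 'Z') ++ (c :: t) = l.reverse := by
        rw [← h]; exact List.takeWhile_append_dropWhile
      have hlen : (l.reverse.takeWhile (fun c => c = 'Z')).length + (t.length + 1) = l.length := by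
        have := congrArg List.length hsplit
        simpa using this
      simp only [h, List.reverse_append, List.reverse_cons, List.reverse_replicate,
        List.reverse_reverse]
      have hne : (t.reverse ++ [c]) ≠ ([] : List Char) := by simp
      rw [if_neg hne]
      have hlast : (t.reverse ++ [c]).getLast? = some c := List.getLast?_concat
      have hdl : (t.reverse ++ [c]).dropLast = t.reverse := List.dropLast_concat
      have hlen2 : l.length - (t.reverse ++ [c]).length =
          (l.reverse.takeWhile (fun c => c = 'Z')).length := by
        simp only [List.length_append, List.length_reverse, List.length_cons, List.length_nil]
        omega
      rw [hlast, hdl, hlen2]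
      simp
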